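-- pv_equiv track=rewrite | github.com/tungedng2710/license-plate-recognition | utils/utils.py | strip_extra_text
-- ===== SOURCE A (Python) =====
-- def strip_extra_text(s: str) -> str:
--     if len(s) > 6:
--         if s[0].isalpha():
--             for i, ch in enumerate(s):
--                 if ch.isdigit():
--                     s = s[i:]
--                     break
--         if s and s[-1].isalpha():
--             for j in range(len(s)-1, -1, -1):
--                 if s[j].isdigit():
--                     s = s[:j+1]
--                     break
--     return s
-- ===== SOURCE B (Python) =====
-- def strip_extra_text(s: str) -> str:
--     if len(s) <= 6:
--         return s
--     digits = [i for i in range(len(s)) if s[i].isdigit()]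
--     start = digits[0] if digits and s[0].isalpha() else 0
--     end = digits[-1] + 1 if digits and s[-1].isalpha() else len(s)
--     return s[start:end]
-- ===== Notes on version B (the rewrite author's own statement) =====
-- stated objective: simpler
-- what changed: A trims in two sequential passes (a forward scan that reassigns s = s[i:], then a backward scan over the reassigned string that reassigns s = s[:j+1]); B collects all digit positions in one forward comprehension and returns a single slice s[start:end] computed from the first and last digit position.
import Mathlib
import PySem

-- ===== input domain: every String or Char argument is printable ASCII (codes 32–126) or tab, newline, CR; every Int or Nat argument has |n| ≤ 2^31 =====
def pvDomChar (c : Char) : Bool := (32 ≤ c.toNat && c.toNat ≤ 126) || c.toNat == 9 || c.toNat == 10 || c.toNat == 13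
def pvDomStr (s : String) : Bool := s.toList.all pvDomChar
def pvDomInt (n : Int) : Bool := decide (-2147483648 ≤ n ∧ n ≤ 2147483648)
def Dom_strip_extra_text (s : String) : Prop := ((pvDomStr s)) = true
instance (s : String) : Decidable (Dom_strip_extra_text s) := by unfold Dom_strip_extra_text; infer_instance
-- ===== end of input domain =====

-- B replaces A's two sequential trim passes by one collection of all digit positions and a single slice (objective: simpler decomposition).

-- ===== PORT A =====
-- 'for i, ch in enumerate(s): if ch.isdigit(): s = s[i:]; break'
def pvTrimFrontA (orig : List Char) : List Char → Nat → List Char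
  | [], _ => orig
  | c :: rest, i =>
    if PySem.Chars.isdigit c then PySem.List.slice orig (some (i : Int)) none
    else pvTrimFrontA orig rest (i + 1)

-- 'for j in range(len(s)-1, -1, -1): if s[j].isdigit(): s = s[:j+1]; break'
def pvTrimBackA (cs : List Char) : Nat → List Char
  | 0 => cs
  | k + 1 =>
    if PySem.Chars.isdigit (cs.getD k ' ') then PySem.List.slice cs none (some ((k + 1 : Nat) : Int))
    else pvTrimBackA cs k

def strip_extra_text (s : String) : String :=
  let cs := s.toList
  if 6 < cs.length then
    let cs1 := if PySem.Chars.isalpha (cs.getD 0 ' ') then pvTrimFrontA cs cs 0 else cs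
    let cs2 := if cs1 ≠ [] ∧ PySem.Chars.isalpha (cs1.getLastD ' ') then pvTrimBackA cs1 cs1.length
               else cs1
    String.ofList cs2
  else s

-- ===== PORT B =====
-- 'digits = [i for i in range(len(s)) if s[i].isdigit()]'
def pvDigitsB (cs : List Char) : List Nat :=
  (List.range cs.length).filter (fun i => PySem.Chars.isdigit (cs.getD i ' '))

def strip_extra_text_alt (s : String) : String :=
  let cs := s.toList
  if cs.length ≤ 6 then s
  else
    let digits := pvDigitsB cs
    let start : Nat := if digits ≠ [] ∧ PySem.Chars.isalpha (cs.getD 0 ' ') then digits.headD 0 else 0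
    let stop : Nat := if digits ≠ [] ∧ PySem.Chars.isalpha (cs.getLastD ' ') then digits.getLastD 0 + 1
                      else cs.length
    String.ofList (PySem.List.slice cs (some (start : Int)) (some (stop : Int)))

-- ===== PRECONDITION & SPEC =====
def Spec_strip_extra_text (s : String) (out : String) : Prop := out = strip_extra_text_alt s
instance (s : String) (out : String) : Decidable (Spec_strip_extra_text s out) := by unfold Spec_strip_extra_text; infer_instance

-- ===== CLAIM (what is proved, stated in full; the proofs are below) =====
def Claim_equal_strip_extra_text : Prop := ∀ (s : String), Dom_strip_extra_text s → Spec_strip_extra_text s (strip_extra_text s)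

-- ===== LEMMAS AND PROOFS =====

theorem pvTrimFrontA_eq (cs : List Char) : ∀ (l : List Char) (i : Nat),
    pvTrimFrontA cs l i =
      match l.findIdx? PySem.Chars.isdigit with
      | none => cs
      | some k => cs.drop (i + k) := by
  intro l
  induction l with
  | nil => intro i; simp [pvTrimFrontA]
  | cons c rest ih =>
    intro i
    by_cases hc : PySem.Chars.isdigit c
    · simp [pvTrimFrontA, hc, List.findIdx?_cons, PySem.List.slice_from_natCast]
    · simp only [pvTrimFrontA, hc, if_false, List.findIdx?_cons, Bool.false_eq_true, ih]
      cases h : rest.findIdx? PySem.Chars.isdigit with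
      | none => simp
      | some k => simp [Nat.add_assoc, Nat.add_comm 1 k]

theorem pvTrimBackA_eq (cs : List Char) : ∀ (k : Nat),
    pvTrimBackA cs k =
      match ((List.range k).filter (fun i => PySem.Chars.isdigit (cs.getD i ' '))).getLast? with
      | none => cs
      | some j => cs.take (j + 1) := by
  intro k
  induction k with
  | zero => simp [pvTrimBackA]
  | succ k ih =>
    rw [show pvTrimBackA cs (k + 1) =
        (if PySem.Chars.isdigit (cs.getD k ' ') then
          PySem.List.slice cs none (some ((k + 1 : Nat) : Int))
        else pvTrimBackA cs k) from rfl,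
      List.range_succ, List.filter_append]
    by_cases hk : PySem.Chars.isdigit (cs.getD k ' ')
    · rw [if_pos hk,
        show List.filter (fun i => PySem.Chars.isdigit (cs.getD i ' ')) [k] = [k] by
          simp only [List.filter_singleton, hk, cond_true],
        List.getLast?_concat, PySem.List.slice_to_natCast]
    · rw [if_neg hk,
        show List.filter (fun i => PySem.Chars.isdigit (cs.getD i ' ')) [k] = [] by
          simp only [Bool.not_eq_true] at hk
          simp only [List.filter_singleton, hk, cond_false],
        List.append_nil, ih]

theorem pvDigitsB_cons (c : Char) (l : List Char) :
    pvDigitsB (c :: l) =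
      (if PySem.Chars.isdigit c then [0] else []) ++ (pvDigitsB l).map (· + 1) := by
  simp only [pvDigitsB, List.length_cons, List.range_succ_eq_map, List.filter_cons,
    List.getD_cons_zero, List.filter_map]
  by_cases hc : PySem.Chars.isdigit c <;>
    simp [hc, Function.comp_def]

theorem pvDigitsB_head (cs : List Char) :
    (pvDigitsB cs).head? = cs.findIdx? PySem.Chars.isdigit := by
  induction cs with
  | nil => simp [pvDigitsB]
  | cons c l ih =>
    rw [pvDigitsB_cons, List.findIdx?_cons]
    by_cases hc : PySem.Chars.isdigit c
    · simp [hc]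
    · simp [hc, ← ih, List.head?_map]

theorem pvDigitsB_drop (cs : List Char) : ∀ (k : Nat),
    pvDigitsB (cs.drop k) = ((pvDigitsB cs).filter (fun i => k ≤ i)).map (· - k) := by
  induction cs with
  | nil => intro k; simp [pvDigitsB]
  | cons c l ih =>
    intro k
    cases k with
    | zero =>
      simp only [List.drop_zero]
      rw [List.filter_eq_self.mpr (fun a _ => decide_eq_true (Nat.zero_le a))]
      simp
    | succ k =>
      rw [List.drop_succ_cons, ih k, pvDigitsB_cons, List.filter_append, List.map_append]
      have h0 : List.filter (fun i => decide (k + 1 ≤ i))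
          (if PySem.Chars.isdigit c then [0] else []) = [] := by
        by_cases hc : PySem.Chars.isdigit c <;> simp [hc]
      rw [h0, List.map_nil, List.nil_append, List.filter_map, List.map_map]
      have h1 : ((fun i => decide (k + 1 ≤ i)) ∘ (fun x => x + 1)) = (fun a => decide (k ≤ a)) := by
        funext a; simp only [Function.comp_apply, decide_eq_decide]; omega
      have h2 : ((fun x : Nat => x - (k + 1)) ∘ (fun x => x + 1)) = (fun x => x - k) := by
        funext a; simp only [Function.comp_apply]; omega
      rw [h1, h2]

theorem getLast?_filter_of_getLast {l : List Nat} {x : Nat} {q : Nat → Bool}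
    (h : l.getLast? = some x) (hq : q x = true) : (l.filter q).getLast? = some x := by
  obtain ⟨l', rfl⟩ := List.getLast?_eq_some_iff.mp h
  simp [List.filter_append, hq]

theorem headD_le_getLastD {l : List Nat} (hp : l.Pairwise (· < ·)) (hne : l ≠ []) :
    l.headD 0 ≤ l.getLastD 0 := by
  cases l with
  | nil => simp at hne
  | cons a t =>
    rw [show (a :: t).headD 0 = a from rfl, List.getLastD_cons]
    have hmem : t.getLastD a ∈ a :: t := List.getLastD_mem_cons
    rcases List.mem_cons.mp hmem with h | h
    · rw [h]
    · exact le_of_lt ((List.pairwise_cons.mp hp).1 _ h)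

theorem pvDigitsB_pairwise (cs : List Char) : (pvDigitsB cs).Pairwise (· < ·) :=
  List.Pairwise.sublist List.filter_sublist List.pairwise_lt_range

theorem pvDigitsB_mem_lt {cs : List Char} {i : Nat} (h : i ∈ pvDigitsB cs) : i < cs.length := by
  have := List.mem_filter.mp h
  exact List.mem_range.mp this.1

theorem getLast?_drop_of_lt {cs : List Char} {k : Nat} (h : k < cs.length) :
    (cs.drop k).getLastD ' ' = cs.getLastD ' ' ∧ cs.drop k ≠ [] := by
  have hne : cs.drop k ≠ [] := by
    intro hcon
    have := List.drop_eq_nil_iff.mp hcon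
    omega
  refine ⟨?_, hne⟩
  conv_rhs => rw [← List.take_append_drop k cs]
  rw [List.getLastD_eq_getLast?, List.getLastD_eq_getLast?,
    List.getLast?_append_of_ne_nil _ hne]

-- main list-level equivalence in the long case
theorem main_list_eq (cs : List Char) (h6 : 6 < cs.length) :
    (let cs1 := if PySem.Chars.isalpha (cs.getD 0 ' ') then pvTrimFrontA cs cs 0 else cs
     let cs2 := if cs1 ≠ [] ∧ PySem.Chars.isalpha (cs1.getLastD ' ') then pvTrimBackA cs1 cs1.length
                else cs1
     cs2) =
    (let digits := pvDigitsB cs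
     let start : Nat := if digits ≠ [] ∧ PySem.Chars.isalpha (cs.getD 0 ' ') then digits.headD 0 else 0
     let stop : Nat := if digits ≠ [] ∧ PySem.Chars.isalpha (cs.getLastD ' ') then digits.getLastD 0 + 1
                       else cs.length
     PySem.List.slice cs (some (start : Int)) (some (stop : Int))) := by
  have hcs : cs ≠ [] := by intro h; subst h; simp at h6
  simp only [PySem.List.slice_natCast]
  by_cases hD : pvDigitsB cs = []
  · -- no digit anywhere: nothing is trimmed on either side
    have hfind : cs.findIdx? PySem.Chars.isdigit = none := by
      rw [← pvDigitsB_head, hD]; rfl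
    have hback0 : pvTrimBackA cs cs.length = cs := by
      rw [pvTrimBackA_eq,
        show ((List.range cs.length).filter
          (fun i => PySem.Chars.isdigit (cs.getD i ' '))).getLast? = none by
            rw [show (List.range cs.length).filter
              (fun i => PySem.Chars.isdigit (cs.getD i ' ')) = [] from hD]
            rfl]
    have hfront : pvTrimFrontA cs cs 0 = cs := by rw [pvTrimFrontA_eq, hfind]
    simp only [hD, ne_eq, not_true_eq_false, false_and, if_false, List.drop_zero, Nat.sub_zero,
      List.take_length]
    have h1 : (if PySem.Chars.isalpha (cs.getD 0 ' ') then pvTrimFrontA cs cs 0 else cs) = cs := by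
      split_ifs with h
      · exact hfront
      · rfl
    rw [h1]
    split_ifs with h2
    · exact hback0
    · rfl
  · -- at least one digit
    set d0 := (pvDigitsB cs).headD 0 with hd0
    set dl := (pvDigitsB cs).getLastD 0 with hdl
    have hhead : (pvDigitsB cs).head? = some d0 := by
      cases h : pvDigitsB cs with
      | nil => exact absurd h hD
      | cons a t => simp [hd0, h]
    have hlast : (pvDigitsB cs).getLast? = some dl := by
      rw [hdl]
      cases hx : (pvDigitsB cs).getLast? with
      | none => exact absurd (List.getLast?_eq_none_iff.mp hx) hD
      | some v => rw [List.getLastD_eq_getLast?, hx]; rfl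
    have hd0dl : d0 ≤ dl := headD_le_getLastD (pvDigitsB_pairwise cs) hD
    have hdln : dl < cs.length := pvDigitsB_mem_lt (List.mem_of_getLast? hlast)
    have hd0n : d0 < cs.length := lt_of_le_of_lt hd0dl hdln
    have hfind : cs.findIdx? PySem.Chars.isdigit = some d0 := by rw [← pvDigitsB_head, hhead]
    have hback_cs : pvTrimBackA cs cs.length = cs.take (dl + 1) := by
      rw [pvTrimBackA_eq,
        show ((List.range cs.length).filter
          (fun i => PySem.Chars.isdigit (cs.getD i ' '))).getLast? = some dl from hlast]
    by_cases ha : PySem.Chars.isalpha (cs.getD 0 ' ')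
    · -- prefix trimmed to the first digit
      have hfront : pvTrimFrontA cs cs 0 = cs.drop d0 := by
        rw [pvTrimFrontA_eq, hfind]; simp
      obtain ⟨hlastD, hdropne⟩ := getLast?_drop_of_lt hd0n
      have hdigdrop : (pvDigitsB (cs.drop d0)).getLast? = some (dl - d0) := by
        rw [pvDigitsB_drop, List.getLast?_map,
          getLast?_filter_of_getLast hlast (by simp [hd0dl])]
        rfl
      have hc2 : pvDigitsB cs ≠ [] ∧ PySem.Chars.isalpha (cs.getD 0 ' ') = true := ⟨hD, ha⟩
      rw [if_pos ha, hfront, if_pos hc2]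
      by_cases hb : PySem.Chars.isalpha (cs.getLastD ' ')
      · have hc1 : cs.drop d0 ≠ [] ∧ PySem.Chars.isalpha ((cs.drop d0).getLastD ' ') = true :=
          ⟨hdropne, by rw [hlastD]; exact hb⟩
        have hc3 : pvDigitsB cs ≠ [] ∧ PySem.Chars.isalpha (cs.getLastD ' ') = true := ⟨hD, hb⟩
        rw [if_pos hc1, if_pos hc3, pvTrimBackA_eq,
          show ((List.range (cs.drop d0).length).filter
            (fun i => PySem.Chars.isdigit ((cs.drop d0).getD i ' '))).getLast? = some (dl - d0)
            from hdigdrop]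
        show (cs.drop d0).take (dl - d0 + 1) = (cs.drop d0).take (dl + 1 - d0)
        congr 1
        omega
      · have hnc1 : ¬(cs.drop d0 ≠ [] ∧ PySem.Chars.isalpha ((cs.drop d0).getLastD ' ') = true) := by
          rintro ⟨-, hcon⟩; rw [hlastD] at hcon; exact hb hcon
        have hnc3 : ¬(pvDigitsB cs ≠ [] ∧ PySem.Chars.isalpha (cs.getLastD ' ') = true) :=
          fun hcon => hb hcon.2
        rw [if_neg hnc1, if_neg hnc3, List.take_of_length_le (by simp)]
    · -- prefix untouched
      have hnc2 : ¬(pvDigitsB cs ≠ [] ∧ PySem.Chars.isalpha (cs.getD 0 ' ') = true) :=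
        fun hcon => ha hcon.2
      rw [if_neg ha, if_neg hnc2, List.drop_zero]
      by_cases hb : PySem.Chars.isalpha (cs.getLastD ' ')
      · have hcl : cs ≠ [] ∧ PySem.Chars.isalpha (cs.getLastD ' ') = true := ⟨hcs, hb⟩
        have hc3 : pvDigitsB cs ≠ [] ∧ PySem.Chars.isalpha (cs.getLastD ' ') = true := ⟨hD, hb⟩
        rw [if_pos hcl, if_pos hc3, hback_cs, Nat.sub_zero]
      · have hncl : ¬(cs ≠ [] ∧ PySem.Chars.isalpha (cs.getLastD ' ') = true) :=
          fun hcon => hb hcon.2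
        have hnc3 : ¬(pvDigitsB cs ≠ [] ∧ PySem.Chars.isalpha (cs.getLastD ' ') = true) :=
          fun hcon => hb hcon.2
        rw [if_neg hncl, if_neg hnc3, Nat.sub_zero, List.take_length]

-- ===== VERDICT (by name: the statement is the Claim_ definition above) =====
theorem strip_extra_text_spec : Claim_equal_strip_extra_text := by
  intro s _
  show strip_extra_text s = strip_extra_text_alt s
  unfold strip_extra_text strip_extra_text_alt
  by_cases h6 : 6 < s.toList.length
  · have h6' : ¬s.toList.length ≤ 6 := by omega
    simp only [if_pos h6, if_neg h6']
    exact congrArg String.ofList (main_list_eq s.toList h6)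
  · have h6' : s.toList.length ≤ 6 := by omega
    simp only [if_neg h6, if_pos h6']
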